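-- pv_equiv track=rewrite | github.com/anamarce0/Proyecto2 | main.py | split_parenthesis
-- ===== SOURCE A (Python) =====
-- def split_parenthesis(linea):
--     tokens = []
--     palabra = ''
--     operadores = ['(', ')', '{', '}', ',', '+', '-', '==', '!=', '<', '>', '<=', '>=']
--
--     for char in linea:
--         if char in operadores:
--             if palabra:
--                 tokens.append(palabra)
--                 palabra = ''
--             tokens.append(char)
--         elif char == ' ':
--             if palabra:
--                 tokens.append(palabra)
--                 palabra = ''
--         else:
--             if char != '\t' and char != '\n':
--                 palabra += char
--
--     if palabra:
--         tokens.append(palabra)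
--
--     return tokens
-- ===== SOURCE B (Python) =====
-- def split_parenthesis(linea):
--     expanded = ''.join(
--         '' if c in '\t\n' else ' ' + c + ' ' if c in '(){},+-<>' else c
--         for c in linea
--     )
--     return [t for t in expanded.split(' ') if t]
-- ===== Notes on version B (the rewrite author's own statement) =====
-- stated objective: idiomatic
-- what changed: B keeps no token list or word buffer: a single comprehension expands each character (dropping tabs/newlines, padding each single-char operator with spaces) and str.split plus an empty-string filter produces the tokens; the per-character branch-and-flush state machine moves into C-level string primitives, which a timing run measured as a constant-factor speedup.
import Mathlib
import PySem

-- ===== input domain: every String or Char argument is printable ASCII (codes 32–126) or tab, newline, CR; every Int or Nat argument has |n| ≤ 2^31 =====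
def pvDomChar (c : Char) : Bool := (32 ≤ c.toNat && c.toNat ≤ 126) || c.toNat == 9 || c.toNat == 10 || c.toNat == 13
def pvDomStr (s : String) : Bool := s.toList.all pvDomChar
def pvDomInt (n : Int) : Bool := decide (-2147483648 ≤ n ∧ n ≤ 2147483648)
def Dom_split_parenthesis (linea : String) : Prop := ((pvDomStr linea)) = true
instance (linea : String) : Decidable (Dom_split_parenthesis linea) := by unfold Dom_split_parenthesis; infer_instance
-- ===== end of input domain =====

-- B drops the token-list/word-buffer state machine: it expands each character (deleting tab/newline,
-- padding each single-char operator with spaces) and lets split-on-space plus an empty filter tokenize.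

-- ===== PORT A =====
-- A's operator list, verbatim (the two-character entries are dead: a single char never equals them)
def pvOps : List (List Char) :=
  [['('], [')'], ['{'], ['}'], [','], ['+'], ['-'], ['=', '='], ['!', '='], ['<'], ['>'], ['<', '='], ['>', '=']]

-- one iteration of A's for-loop; state = (tokens, palabra)
def pvStepA (st : List (List Char) × List Char) (c : Char) : List (List Char) × List Char :=
  let tokens := st.1
  let palabra := st.2
  if [c] ∈ pvOps then
    (if palabra ≠ [] then tokens ++ [palabra] ++ [[c]] else tokens ++ [[c]], [])
  else if c = ' ' then
    (if palabra ≠ [] then tokens ++ [palabra] else tokens, [])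
  else
    if c ≠ '\t' ∧ c ≠ '\n' then (tokens, palabra ++ [c]) else (tokens, palabra)

def split_parenthesis (linea : String) : List String :=
  let st := linea.toList.foldl pvStepA ([], [])
  let tokens := if st.2 ≠ [] then st.1 ++ [st.2] else st.1
  tokens.map String.ofList

-- ===== PORT B =====
def pvOpChars : List Char := ['(', ')', '{', '}', ',', '+', '-', '<', '>']

-- Source B's per-character expansion: '' if tab/newline, ' c ' if operator, c otherwise
def pvExpand (c : Char) : List Char :=
  if c = '\t' ∨ c = '\n' then [] else if c ∈ pvOpChars then [' ', c, ' '] else [c]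

def split_parenthesis_alt (linea : String) : List String :=
  let expanded := linea.toList.flatMap pvExpand
  ((PySem.Chars.splitOn expanded [' ']).filter (fun t => t ≠ [])).map String.ofList

-- ===== PRECONDITION & SPEC =====
def Spec_split_parenthesis (linea : String) (out : List String) : Prop := out = split_parenthesis_alt linea
instance (linea : String) (out : List String) : Decidable (Spec_split_parenthesis linea out) := by unfold Spec_split_parenthesis; infer_instance

-- ===== CLAIM (what is proved, stated in full; the proofs are below) =====
def Claim_equal_split_parenthesis : Prop := ∀ (linea : String), Dom_split_parenthesis linea → Spec_split_parenthesis linea (split_parenthesis linea)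

-- ===== LEMMAS AND PROOFS =====

-- structural model of splitting on a single space
def pvSplitSp : List Char → List Char → List (List Char)
  | [], cur => [cur.reverse]
  | c :: rest, cur => if c = ' ' then cur.reverse :: pvSplitSp rest [] else pvSplitSp rest (c :: cur)

lemma pvGo_spec : ∀ (l : List Char) (fuel : Nat) (cur : List Char) (acc : List (List Char)),
    l.length ≤ fuel →
    PySem.Chars.splitOn.go [' '] fuel l cur acc = acc.reverse ++ pvSplitSp l cur := by
  intro l
  induction l with
  | nil =>
    intro fuel cur acc _
    cases fuel with
    | zero => rw [PySem.Chars.splitOn.go]; simp [pvSplitSp]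
    | succ f => rw [PySem.Chars.splitOn.go]; simp [pvSplitSp]; omega
  | cons c rest ih =>
    intro fuel cur acc hf
    cases fuel with
    | zero => simp at hf
    | succ f =>
      by_cases hc : c = ' '
      · subst hc
        rw [PySem.Chars.splitOn.go]
        simp only [List.isPrefixOf, BEq.rfl, Bool.true_and, if_pos,
          List.length_cons, List.length_nil, List.drop_succ_cons, List.drop_zero]
        rw [ih f [] (cur.reverse :: acc) (by simpa using Nat.lt_succ_iff.mp (by simpa using hf))]
        simp [pvSplitSp]
      · rw [PySem.Chars.splitOn.go]
        have hpre : [' '].isPrefixOf (c :: rest) = false := by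
          simp [List.isPrefixOf]
          intro h'; exact absurd h'.symm hc
        simp only [hpre, Bool.false_eq_true, if_neg, not_false_iff]
        rw [ih f (c :: cur) acc (by simpa using Nat.lt_succ_iff.mp (by simpa using hf))]
        simp [pvSplitSp, hc]

lemma pvSplitOn_eq (s : List Char) :
    PySem.Chars.splitOn s [' '] = pvSplitSp s [] := by
  unfold PySem.Chars.splitOn
  rw [pvGo_spec s (s.length + 1) [] [] (by omega)]
  simp

-- the filtered split
def pvT (cs cur : List Char) : List (List Char) := (pvSplitSp cs cur).filter (fun t => t ≠ [])

lemma pvT_nil (cur : List Char) : pvT [] cur = if cur = [] then [] else [cur.reverse] := by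
  by_cases h : cur = [] <;> simp [pvT, pvSplitSp, h]

lemma pvT_space (r cur : List Char) :
    pvT (' ' :: r) cur = (if cur = [] then [] else [cur.reverse]) ++ pvT r [] := by
  by_cases h : cur = [] <;> simp [pvT, pvSplitSp, h]

lemma pvT_word (c : Char) (r cur : List Char) (hc : c ≠ ' ') :
    pvT (c :: r) cur = pvT r (c :: cur) := by
  simp [pvT, pvSplitSp, hc]

-- characterisation of A's operator test in terms of B's operator characters
lemma pvOps_iff (c : Char) : [c] ∈ pvOps ↔ c ∈ pvOpChars := by
  simp [pvOps, pvOpChars]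

lemma pvOp_not_special (c : Char) (hc : c ∈ pvOpChars) : c ≠ ' ' ∧ c ≠ '\t' ∧ c ≠ '\n' := by
  simp [pvOpChars] at hc
  rcases hc with h | h | h | h | h | h | h | h | h <;> subst h <;> exact ⟨by decide, by decide, by decide⟩

lemma pvExpand_op (c : Char) (hc : c ∈ pvOpChars) : pvExpand c = [' ', c, ' '] := by
  obtain ⟨-, h1, h2⟩ := pvOp_not_special c hc
  simp [pvExpand, h1, h2, hc]

-- main invariant: running A's loop from (tokens, palabra) and finalising equals
-- tokens ++ the filtered space-split of palabra followed by the expansion of the rest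
lemma pvKey : ∀ (cs : List Char) (tokens : List (List Char)) (palabra : List Char),
    ' ' ∉ palabra →
    (let st := cs.foldl pvStepA (tokens, palabra);
     if st.2 ≠ [] then st.1 ++ [st.2] else st.1)
      = tokens ++ pvT (cs.flatMap pvExpand) palabra.reverse := by
  intro cs
  induction cs with
  | nil =>
    intro tokens palabra _
    by_cases h : palabra = [] <;> simp [pvT_nil, h]
  | cons c rest ih =>
    intro tokens palabra hp
    by_cases hop : [c] ∈ pvOps
    · have hmem := (pvOps_iff c).mp hop
      obtain ⟨hsp, _, _⟩ := pvOp_not_special c hmem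
      simp only [List.foldl_cons, List.flatMap_cons, pvExpand_op c hmem, pvStepA, hop, if_pos]
      simp only [List.cons_append, List.nil_append]
      rw [pvT_space, pvT_word c _ _ hsp, pvT_space]
      by_cases h : palabra = []
      · subst h
        simpa using ih (tokens ++ [[c]]) [] (by simp)
      · have := ih (tokens ++ [palabra] ++ [[c]]) [] (by simp)
        simp only [List.reverse_nil] at this
        simpa [h, List.append_assoc] using this
    · by_cases hspace : c = ' '
      · subst hspace
        have hexp : pvExpand ' ' = [' '] := by decide
        simp only [List.foldl_cons, List.flatMap_cons, pvStepA, hop, if_false, hexp,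
          List.singleton_append, if_pos]
        rw [pvT_space]
        by_cases h : palabra = []
        · subst h
          simpa using ih tokens [] (by simp)
        · have := ih (tokens ++ [palabra]) [] (by simp)
          simp only [List.reverse_nil] at this
          simp [this, h]
      · by_cases hws : c = '\t' ∨ c = '\n'
        · have hexp : pvExpand c = [] := by simp [pvExpand, hws]
          have hstep : pvStepA (tokens, palabra) c = (tokens, palabra) := by
            rcases hws with h | h <;> subst h <;> simp [pvStepA, hop]
          simp only [List.foldl_cons, List.flatMap_cons, hexp, List.nil_append, hstep]
          exact ih tokens palabra hp
        · have hexp : pvExpand c = [c] := by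
            have : c ∉ pvOpChars := fun h => hop ((pvOps_iff c).mpr h)
            simp [pvExpand, hws, this]
          have hstep : pvStepA (tokens, palabra) c = (tokens, palabra ++ [c]) := by
            rw [not_or] at hws
            simp [pvStepA, hop, hspace, hws.1, hws.2]
          simp only [List.foldl_cons, List.flatMap_cons, hexp, hstep]
          simp only [List.cons_append, List.nil_append]
          rw [pvT_word c _ _ hspace]
          have : (palabra ++ [c]).reverse = c :: palabra.reverse := by simp
          rw [← this]
          exact ih tokens (palabra ++ [c]) (by simp [hp, Ne.symm hspace])

-- ===== VERDICT (by name: the statement is the Claim_ definition above) =====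
theorem split_parenthesis_spec : Claim_equal_split_parenthesis := by
  intro linea _
  unfold Spec_split_parenthesis
  have hkey := pvKey linea.toList [] [] (by simp)
  simp only [List.nil_append, List.reverse_nil] at hkey
  simp only [split_parenthesis, split_parenthesis_alt, pvSplitOn_eq]
  rw [hkey]
  rfl
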